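-- pv_equiv track=rewrite | github.com/zhymma/KTCE | utils/parser.py | extract_math_tools
-- ===== SOURCE A (Python) =====
-- def extract_math_tools(result: str):
--     """
--     Extract the functions and classes from code string.
--     """
--     tools = []
--     tool = ""
--
--     for line in result.split("\n"):
--         if line.startswith("def") or line.startswith("class"):
--             if tool:
--                 tool = tool.strip()
--                 tools.append(tool)
--             tool = line + "\n"
--         elif tool and (line.startswith(" ") or line.startswith("\t")):
--             tool += line + "\n"
--
--     if tool:
--         tool = tool.strip()
--         tools.append(tool)
--
--     return tools
-- ===== SOURCE B (Python) =====
-- def extract_math_tools(result: str):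
--     """
--     Extract the functions and classes from code string.
--     """
--     lines = result.split("\n")
--     starts = [i for i, ln in enumerate(lines)
--               if ln.startswith("def") or ln.startswith("class")]
--     return ["\n".join([lines[s]] + [ln for ln in lines[s + 1:e]
--                                     if ln.startswith(" ") or ln.startswith("\t")]).strip()
--             for s, e in zip(starts, starts[1:] + [len(lines)])]
-- ===== Notes on version B (the rewrite author's own statement) =====
-- stated objective: alternative
-- what changed: Replaces A's single running-accumulator scan (growing a 'tool' string and flushing it at each boundary) by a two-pass boundary table: first collect the indices of all 'def'/'class' start lines, then for each consecutive pair of starts slice the line segment, filter it for indented continuation lines, and join/strip it.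
import Mathlib
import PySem

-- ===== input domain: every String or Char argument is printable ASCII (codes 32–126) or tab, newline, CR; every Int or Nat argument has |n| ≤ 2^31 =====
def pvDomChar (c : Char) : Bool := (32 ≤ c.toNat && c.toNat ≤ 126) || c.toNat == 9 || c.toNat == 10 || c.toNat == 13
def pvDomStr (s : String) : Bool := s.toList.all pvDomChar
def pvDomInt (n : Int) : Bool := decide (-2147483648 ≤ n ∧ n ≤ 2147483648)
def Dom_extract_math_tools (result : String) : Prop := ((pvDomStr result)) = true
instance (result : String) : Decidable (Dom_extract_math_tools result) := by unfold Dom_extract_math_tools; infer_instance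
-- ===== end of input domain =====

-- B replaces A's running-accumulator scan by a boundary table (start-line indices) plus a
-- per-segment filter/join; same O(n) cost, different decomposition (objective: alternative).

-- ===== PORT A =====
def isStartA (l : List Char) : Bool :=
  PySem.Chars.startswith l "def".toList || PySem.Chars.startswith l "class".toList

def isContA (l : List Char) : Bool :=
  PySem.Chars.startswith l " ".toList || PySem.Chars.startswith l "\t".toList

-- the `for line in …` loop of A, carrying (tools, tool); the trailing `if tool:` flush is the [] case
def aGo : List (List Char) → List (List Char) → List Char → List (List Char)
  | [], tools, tool => if tool = [] then tools else tools ++ [PySem.Chars.strip tool]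
  | line :: rest, tools, tool =>
      if isStartA line then
        aGo rest (if tool = [] then tools else tools ++ [PySem.Chars.strip tool]) (line ++ ['\n'])
      else if tool ≠ [] ∧ isContA line then
        aGo rest tools (tool ++ line ++ ['\n'])
      else
        aGo rest tools tool

def extract_math_tools (result : String) : List String :=
  (aGo (PySem.Chars.splitOn result.toList ['\n']) [] []).map String.ofList

-- ===== PORT B =====
def isStartB (l : List Char) : Bool :=
  PySem.Chars.startswith l "def".toList || PySem.Chars.startswith l "class".toList

def isContB (l : List Char) : Bool :=
  PySem.Chars.startswith l " ".toList || PySem.Chars.startswith l "\t".toList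

-- `[i for i, ln in enumerate(lines) if …]`, ported by hand with Nat indices
-- (exact: the indices produced are the same nonnegative integers Python's enumerate yields)
def bStarts : List (List Char) → Nat → List Nat
  | [], _ => []
  | l :: rest, i => if isStartB l then i :: bStarts rest (i + 1) else bStarts rest (i + 1)

-- `"\n".join([lines[s]] + [ln for ln in lines[s+1:e] if …]).strip()`  (the slice lines[s+1:e]
-- with the nonnegative in-range bounds B uses is exactly drop-then-take; lines[s] is getD)
def bBlock (lines : List (List Char)) (se : Nat × Nat) : List Char :=
  PySem.Chars.strip (PySem.Chars.join ['\n']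
    (lines.getD se.1 [] :: ((lines.drop (se.1 + 1)).take (se.2 - (se.1 + 1))).filter isContB))

def extract_math_tools_alt (result : String) : List String :=
  let lines := PySem.Chars.splitOn result.toList ['\n']
  let starts := bStarts lines 0
  (starts.zip (starts.drop 1 ++ [lines.length])).map (fun se => String.ofList (bBlock lines se))

-- ===== PRECONDITION & SPEC =====
def Spec_extract_math_tools (result : String) (out : List String) : Prop := out = extract_math_tools_alt result
instance (result : String) (out : List String) : Decidable (Spec_extract_math_tools result out) := by unfold Spec_extract_math_tools; infer_instance

-- ===== CLAIM (what is proved, stated in full; the proofs are below) =====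
def Claim_equal_extract_math_tools : Prop := ∀ (result : String), Dom_extract_math_tools result → Spec_extract_math_tools result (extract_math_tools result)

-- ===== LEMMAS AND PROOFS =====

-- the common semantic middle ground: blocks described segment-wise
def glueP (ts : List (List Char)) : List Char :=
  (ts.filter isContB).foldr (fun l acc => l ++ '\n' :: acc) []

def chunksP : List (List Char) → List (List Char)
  | [] => []
  | l :: rest =>
      if isStartB l then
        PySem.Chars.strip (l ++ '\n' :: glueP (rest.takeWhile (fun x => !isStartB x)))
          :: chunksP (rest.dropWhile (fun x => !isStartB x))
      else chunksP rest
  termination_by ls => ls.length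
  decreasing_by
    · have := List.length_dropWhile_le (p := fun x => !isStartB x) (l := rest); simp; omega
    · simp

-- A's loop, with a nonempty accumulator, finishes the current block and proceeds segment-wise
theorem aGo_nonempty (rest : List (List Char)) : ∀ tools tool, tool ≠ [] →
    aGo rest tools tool =
      tools ++ PySem.Chars.strip (tool ++ glueP (rest.takeWhile (fun x => !isStartB x)))
        :: chunksP (rest.dropWhile (fun x => !isStartB x)) := by
  induction rest with
  | nil => intro tools tool h; simp [aGo, chunksP, glueP, h]
  | cons line rest ih =>
    intro tools tool h
    by_cases hs : isStartA line
    · have hs' : isStartB line = true := hs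
      rw [aGo]
      simp only [hs, if_true, h, if_false]
      rw [ih _ _ (by simp)]
      rw [List.takeWhile_cons, List.dropWhile_cons]
      simp [hs', chunksP, glueP]
    · have hs' : isStartB line = false := by simpa using hs
      by_cases hc : isContA line
      · have hc' : isContB line = true := hc
        rw [aGo, if_neg hs, if_pos (show tool ≠ [] ∧ isContA line from ⟨h, hc⟩),
            List.append_assoc, ih _ _ (by simp), List.takeWhile_cons, List.dropWhile_cons]
        simp [hs', glueP, hc']
      · have hc' : isContB line = false := by simpa using hc
        rw [aGo]
        simp only [hs, hc]
        rw [ih _ _ h]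
        rw [List.takeWhile_cons, List.dropWhile_cons]
        simp [hs', glueP, hc']

theorem aGo_empty (ls : List (List Char)) : ∀ tools, aGo ls tools [] = tools ++ chunksP ls := by
  induction ls with
  | nil => intro tools; simp [aGo, chunksP]
  | cons line rest ih =>
    intro tools
    by_cases hs : isStartA line
    · have hs' : isStartB line = true := hs
      rw [aGo]
      simp only [hs, if_true]
      rw [aGo_nonempty _ _ _ (by simp)]
      simp [chunksP, hs']
    · have hs' : isStartB line = false := by simpa using hs
      rw [aGo]
      simp only [hs, ne_eq, not_true_eq_false, false_and, if_false]
      rw [ih]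
      rw [chunksP]
      simp [hs']

theorem bStarts_shift (ls : List (List Char)) : ∀ i, bStarts ls (i + 1) = (bStarts ls i).map (· + 1) := by
  induction ls with
  | nil => intro i; simp [bStarts]
  | cons l rest ih =>
    intro i
    by_cases hs : isStartB l <;> simp [bStarts, hs, ih]

theorem bBlock_shift (x : List Char) (rest : List (List Char)) (s e : Nat) :
    bBlock (x :: rest) (s + 1, e + 1) = bBlock rest (s, e) := by
  simp [bBlock, Nat.succ_sub_succ]

theorem bTail_shift (x : List Char) (rest : List (List Char)) (ss : List Nat) :
    ((ss.map (· + 1)).zip ((ss.map (· + 1)).drop 1 ++ [rest.length + 1])).map (bBlock (x :: rest))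
      = (ss.zip (ss.drop 1 ++ [rest.length])).map (bBlock rest) := by
  have h1 : (ss.map (· + 1)).drop 1 ++ [rest.length + 1] = (ss.drop 1 ++ [rest.length]).map (· + 1) := by
    simp
  rw [h1, List.zip_map, List.map_map]
  exact List.map_congr_left (fun p _ => by
    cases p with
    | mk a b => simpa using bBlock_shift x rest a b)

theorem bStarts_nil_takeWhile (ls : List (List Char)) : ∀ i, bStarts ls i = [] →
    ls.takeWhile (fun x => !isStartB x) = ls := by
  induction ls with
  | nil => simp
  | cons l rest ih =>
    intro i h
    by_cases hs : isStartB l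
    · simp [bStarts, hs] at h
    · simp only [bStarts, hs] at h
      simp [hs, ih _ h]

theorem bStarts_head_take (ls : List (List Char)) : ∀ j ss, bStarts ls 0 = j :: ss →
    ls.takeWhile (fun x => !isStartB x) = ls.take j := by
  induction ls with
  | nil => intro j ss h; simp [bStarts] at h
  | cons l rest ih =>
    intro j ss h
    by_cases hs : isStartB l
    · simp [bStarts, hs] at h
      simp [hs, ← h.1]
    · simp only [bStarts, hs] at h
      rw [bStarts_shift] at h
      cases hb : bStarts rest 0 with
      | nil => rw [hb] at h; simp at h
      | cons j' ss' =>
        rw [hb] at h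
        simp only [Bool.false_eq_true, if_false, List.map_cons, List.cons.injEq] at h
        rw [List.takeWhile_cons]
        simp only [hs, Bool.not_false, if_true]
        rw [← h.1]
        simp [ih _ _ hb]

theorem chunksP_dropWhile (ls : List (List Char)) :
    chunksP (ls.dropWhile (fun x => !isStartB x)) = chunksP ls := by
  induction ls with
  | nil => simp
  | cons l rest ih =>
    by_cases hs : isStartB l
    · simp [hs]
    · rw [List.dropWhile_cons]
      simp only [hs, Bool.not_false, if_true]
      rw [ih, chunksP]
      simp [hs]

theorem join_glue (x : List Char) (fs : List (List Char)) :
    x ++ '\n' :: fs.foldr (fun l acc => l ++ '\n' :: acc) [] = PySem.Chars.join ['\n'] (x :: fs) ++ ['\n'] := by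
  induction fs generalizing x with
  | nil => simp [PySem.Chars.join_singleton]
  | cons y fs ih => rw [PySem.Chars.join_cons_cons]; simp [← ih y]

theorem rstrip_newline (zs : List Char) :
    PySem.Chars.rstrip (zs ++ ['\n']) = PySem.Chars.rstrip zs := by
  unfold PySem.Chars.rstrip
  rw [List.reverse_append, List.reverse_singleton, List.singleton_append,
      List.dropWhile_cons, if_pos (by decide)]

theorem strip_newline (ys : List Char) :
    PySem.Chars.strip (ys ++ ['\n']) = PySem.Chars.strip ys := by
  show PySem.Chars.rstrip (PySem.Chars.lstrip (ys ++ ['\n'])) = PySem.Chars.rstrip (PySem.Chars.lstrip ys)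
  unfold PySem.Chars.lstrip
  rw [List.dropWhile_append]
  by_cases h : (List.dropWhile PySem.Chars.isspace ys).isEmpty
  · rw [if_pos h]
    rw [List.isEmpty_iff] at h
    rw [h]
    have hnl : List.dropWhile PySem.Chars.isspace ['\n'] = [] := by decide
    rw [hnl]
  · rw [if_neg h]
    exact rstrip_newline _

-- a block accumulated with trailing newlines strips to the same text as B's '\n'-join of its lines
theorem head_eq (x : List Char) (ts : List (List Char)) :
    PySem.Chars.strip (x ++ '\n' :: glueP ts)
      = PySem.Chars.strip (PySem.Chars.join ['\n'] (x :: ts.filter isContB)) := by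
  rw [glueP, join_glue, strip_newline]

-- B's boundary-table extraction computes exactly the segment-wise blocks
theorem bMain (ls : List (List Char)) :
    ((bStarts ls 0).zip ((bStarts ls 0).drop 1 ++ [ls.length])).map (bBlock ls) = chunksP ls := by
  induction ls with
  | nil => simp [bStarts, chunksP]
  | cons x rest ih =>
    by_cases hs : isStartB x
    · rw [show bStarts (x :: rest) 0 = 0 :: (bStarts rest 0).map (· + 1) by
        simp [bStarts, hs, bStarts_shift]]
      cases hss : bStarts rest 0 with
      | nil =>
        have htw : rest.takeWhile (fun x => !isStartB x) = rest := bStarts_nil_takeWhile rest 0 hss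
        have hdw : rest.dropWhile (fun x => !isStartB x) = [] := by
          have h2 := List.takeWhile_append_dropWhile (p := fun x => !isStartB x) (l := rest)
          rw [htw] at h2
          have h3 := congrArg List.length h2
          simp only [List.length_append] at h3
          have h4 : (rest.dropWhile (fun x => !isStartB x)).length = 0 := by omega
          exact List.eq_nil_of_length_eq_zero h4
        rw [chunksP]
        simp only [hs, if_true, htw, hdw]
        rw [chunksP]
        simp only [List.map_nil, List.drop_one]
        rw [head_eq]
        simp [bBlock, List.take_length]
      | cons j ss' =>
        have htw : rest.takeWhile (fun x => !isStartB x) = rest.take j :=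
          bStarts_head_take rest j ss' hss
        rw [chunksP]
        simp only [hs, if_true, htw]
        have hzip : ((0 : Nat) :: ((j :: ss').map (· + 1))).zip
            ((((0 : Nat) :: ((j :: ss').map (· + 1))).drop 1) ++ [(x :: rest).length])
            = (0, j + 1) :: (((j :: ss').map (· + 1)).zip (((j :: ss').map (· + 1)).drop 1 ++ [rest.length + 1])) := by
          simp [List.zip_cons_cons]
        rw [hzip, List.map_cons, bTail_shift, ← hss, ih, chunksP_dropWhile, head_eq]
        congr 2
    · rw [show bStarts (x :: rest) 0 = (bStarts rest 0).map (· + 1) by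
        simp [bStarts, hs, bStarts_shift]]
      rw [show (x :: rest).length = rest.length + 1 from rfl, bTail_shift, ih, chunksP]
      simp [hs]

-- ===== VERDICT (by name: the statement is the Claim_ definition above) =====
theorem extract_math_tools_spec : Claim_equal_extract_math_tools := by
  intro result _
  unfold Spec_extract_math_tools extract_math_tools extract_math_tools_alt
  rw [aGo_empty, List.nil_append, ← bMain, List.map_map]
  rfl
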